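-- pv_equiv track=rewrite | github.com/hesh64/Algos | sysdesign/network/stp_server_to_client.py | total_time
-- ===== SOURCE A (Python) =====
-- from collections import deque
--
-- def total_time(main_server_id, parents, delays):
--     n = len(parents)
--     graph = {i: [] for i in range(n)}
--
--     for i, val in enumerate(parents):
--         if val not in graph:
--             graph[val] = []
--         graph[val].append(i)
--
--     s = 0
--     q = deque()
--     q.append([main_server_id, delays[main_server_id]])
--     while q:
--         cur_id, cur_delay = q.popleft()
--         s = max(s, cur_delay)
--         for child in graph[cur_id]:
--             q.append([child, cur_delay + delays[child]])
--     return s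
-- ===== SOURCE B (Python) =====
-- def total_time(main_server_id, parents, delays):
--     n = len(parents)
--     best = delays[main_server_id]
--     memo = {}
--     for i in range(n):
--         chain = []
--         seen = set()
--         j = i
--         while j != main_server_id and 0 <= j < n and j not in memo and j not in seen:
--             seen.add(j)
--             chain.append(j)
--             j = parents[j]
--         if j == main_server_id:
--             acc = delays[main_server_id]
--         elif j in memo:
--             acc = memo[j]
--         else:
--             acc = None
--         for k in reversed(chain):
--             if acc is not None:
--                 acc = acc + delays[k]
--             memo[k] = acc
--         if acc is not None and acc > best:
--             best = acc
--     return best if best > 0 else 0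
-- ===== Notes on version B (the rewrite author's own statement) =====
-- stated objective: alternative
-- what changed: B drops A's children-adjacency dict and downward BFS queue: for each node it walks UP the parents chain, memoizing each node's resolved root-path sum (a seen-set cuts unreachable cycles), so shared ancestor prefixes are resolved once.
import Mathlib
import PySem

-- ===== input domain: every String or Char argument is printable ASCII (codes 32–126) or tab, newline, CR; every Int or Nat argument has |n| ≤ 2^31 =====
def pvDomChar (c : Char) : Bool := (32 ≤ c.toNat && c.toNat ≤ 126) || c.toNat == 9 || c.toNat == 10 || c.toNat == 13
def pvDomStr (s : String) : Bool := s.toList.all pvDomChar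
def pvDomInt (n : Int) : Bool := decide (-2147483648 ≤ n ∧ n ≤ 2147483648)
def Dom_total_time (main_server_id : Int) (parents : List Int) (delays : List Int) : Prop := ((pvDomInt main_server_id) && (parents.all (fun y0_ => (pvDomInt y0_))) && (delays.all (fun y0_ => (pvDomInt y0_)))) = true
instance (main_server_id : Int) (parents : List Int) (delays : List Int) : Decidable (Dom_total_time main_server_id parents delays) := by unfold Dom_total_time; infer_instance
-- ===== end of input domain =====

-- B replaces A's children-adjacency-dict + BFS queue by memoized upward parent-chain
-- walks (objective: alternative — a different traversal of the same data, same cost).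

-- ===== PORT A =====

-- delays[j] / parents[j]: Python indexing; total form pyGetD is used only where
-- Pre_total_time guarantees the index is in range (elsewhere A raises and is excluded).
def pvIx (xs : List Int) (j : Int) : Int := PySem.List.pyGetD xs j 0

-- graph = {i: [] for i in range(n)}; then for i, val in enumerate(parents): graph.setdefault-style append
def pvGraph (parents : List Int) : PySem.Dict Int (List Int) :=
  (PySem.List.enumerate parents 0).foldl
    (fun d p => d.modify p.2 [] (fun l => l ++ [p.1]))
    ((PySem.List.pyRange 0 (PySem.List.len parents) 1).foldl
      (fun d i => d.insert i ([] : List Int)) PySem.Dict.empty)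

-- the while-q loop; fuel n+2 is enough on every input admitted by Pre_total_time
-- (each node is enqueued at most once there); 'none' branch = Python's KeyError (outside Pre_).
def pvBfs (delays : List Int) (g : PySem.Dict Int (List Int)) :
    Nat → List (Int × Int) → Int → Int
  | 0, _, s => s
  | _ + 1, [], s => s
  | f + 1, (c, d) :: q, s =>
    let s' := max s d
    match g.get? c with
    | none => s'
    | some cs => pvBfs delays g f (q ++ cs.map (fun ch => (ch, d + pvIx delays ch))) s'

def total_time (main_server_id : Int) (parents : List Int) (delays : List Int) : Int :=
  match PySem.List.pyGet? delays main_server_id with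
  | none => 0  -- IndexError on delays[main_server_id]: outside Pre_total_time
  | some d0 => pvBfs delays (pvGraph parents) (parents.length + 2) [(main_server_id, d0)] 0

-- ===== PORT B =====

-- the inner while loop of B: walk up the parents chain collecting the unresolved chain;
-- fuel n+1 is exact: chain elements are distinct members of range(n) (the seen set stops cycles).
def pvWalk (m : Int) (parents : List Int) (memo : PySem.Dict Int (Option Int)) :
    Nat → PySem.Set Int → List Int → Int → List Int × Int
  | 0, _, chain, j => (chain, j)
  | f + 1, seen, chain, j =>
    if j ≠ m ∧ 0 ≤ j ∧ j < (parents.length : Int) ∧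
        memo.contains j = false ∧ PySem.Set.contains seen j = false then
      pvWalk m parents memo f (PySem.Set.add seen j) (chain ++ [j]) (pvIx parents j)
    else (chain, j)

-- acc = delays[m] if j == m else memo[j] if j in memo else None
def pvResolve (m : Int) (delays : List Int) (memo : PySem.Dict Int (Option Int)) (j : Int) :
    Option Int :=
  if j = m then some (pvIx delays m) else (memo.get? j).getD none

-- one iteration of B's outer for-loop (state = (memo, best))
def pvStepB (m : Int) (parents delays : List Int)
    (st : PySem.Dict Int (Option Int) × Int) (i : Int) :
    PySem.Dict Int (Option Int) × Int :=
  let w := pvWalk m parents st.1 (parents.length + 1) PySem.Set.empty [] i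
  let r := w.1.reverse.foldl
    (fun (p : PySem.Dict Int (Option Int) × Option Int) k =>
      let a := p.2.map (fun v => v + pvIx delays k)
      (p.1.insert k a, a))
    (st.1, pvResolve m delays st.1 w.2)
  (r.1, match r.2 with
        | some v => if v > st.2 then v else st.2
        | none => st.2)

def total_time_alt (main_server_id : Int) (parents : List Int) (delays : List Int) : Int :=
  match PySem.List.pyGet? delays main_server_id with
  | none => 0  -- same IndexError as A; outside Pre_total_time
  | some d0 =>
    let r := (PySem.List.pyRange 0 (PySem.List.len parents) 1).foldl
      (pvStepB main_server_id parents delays) (PySem.Dict.empty, d0)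
    if r.2 > 0 then r.2 else 0

-- ===== PRECONDITION & SPEC =====

-- one step up the parents chain (m and out-of-range values are fixed points)
def pvStepUp (m : Int) (parents : List Int) (j : Int) : Int :=
  if j ≠ m ∧ 0 ≤ j ∧ j < (parents.length : Int) then pvIx parents j else j

-- does the parents chain from j hit m within f steps?
def pvHit (m : Int) (parents : List Int) : Nat → Int → Bool
  | 0, j => j == m
  | f + 1, j => j == m || pvHit m parents f (pvStepUp m parents j)

-- Pre_total_time holds exactly where Python A returns normally: main_server_id is a key of
-- the built graph (else KeyError), delays[main_server_id] exists (else IndexError),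
-- main_server_id does not lie on a parents-cycle (else the BFS loops forever), and every
-- root-reachable node has a delay entry (else IndexError on delays[child]).
def Pre_total_time (main_server_id : Int) (parents : List Int) (delays : List Int) : Prop :=
  ((0 ≤ main_server_id ∧ main_server_id < (parents.length : Int)) ∨ main_server_id ∈ parents)
  ∧ PySem.Raise.InRange delays.length main_server_id
  ∧ ((0 ≤ main_server_id ∧ main_server_id < (parents.length : Int)) →
      pvHit main_server_id parents parents.length (pvIx parents main_server_id) = false)
  ∧ (∀ i : Nat, i < parents.length →
      pvHit main_server_id parents parents.length (i : Int) = true → (i : Int) < (delays.length : Int))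

instance (main_server_id : Int) (parents : List Int) (delays : List Int) :
    Decidable (Pre_total_time main_server_id parents delays) := by
  unfold Pre_total_time; infer_instance

def pvWitness_total_time : Int × List Int × List Int := (0, [-1], [5])

def Spec_total_time (main_server_id : Int) (parents : List Int) (delays : List Int) (out : Int) : Prop := out = total_time_alt main_server_id parents delays
instance (main_server_id : Int) (parents : List Int) (delays : List Int) (out : Int) : Decidable (Spec_total_time main_server_id parents delays out) := by unfold Spec_total_time; infer_instance

-- ===== CLAIM (what is proved, stated in full; the proofs are below) =====
def Claim_equal_total_time : Prop := ∀ (main_server_id : Int) (parents : List Int) (delays : List Int), Dom_total_time main_server_id parents delays → Pre_total_time main_server_id parents delays → Spec_total_time main_server_id parents delays (total_time main_server_id parents delays)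

-- ===== LEMMAS AND PROOFS =====

-- ---------- proof-only definitions ----------

def pvIt (m : Int) (ps : List Int) (k : Nat) (j : Int) : Int := (pvStepUp m ps)^[k] j

def pvReach (m : Int) (ps : List Int) (j : Int) : Prop := ∃ k, pvIt m ps k j = m

-- the children of v in A's graph, as A stores them
def pvChildren (ps : List Int) (v : Int) : List Int :=
  (PySem.List.pyRange 0 (PySem.List.len ps) 1).filter (fun i => pvIx ps i == v)

-- ---------- chain basics ----------

theorem pvStepUp_m (m : Int) (ps : List Int) : pvStepUp m ps m = m := by
  simp [pvStepUp]

theorem pvIt_m (m : Int) (ps : List Int) (k : Nat) : pvIt m ps k m = m :=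
  Function.iterate_fixed (pvStepUp_m m ps) k

theorem pvIt_zero (m : Int) (ps : List Int) (j : Int) : pvIt m ps 0 j = j := rfl

theorem pvIt_succ (m : Int) (ps : List Int) (k : Nat) (j : Int) :
    pvIt m ps (k + 1) j = pvIt m ps k (pvStepUp m ps j) := by
  simp [pvIt, Function.iterate_succ_apply]

theorem pvIt_add (m : Int) (ps : List Int) (a b : Nat) (j : Int) :
    pvIt m ps (a + b) j = pvIt m ps a (pvIt m ps b j) := by
  simp [pvIt, Function.iterate_add_apply]

theorem pvStepUp_fix (m : Int) (ps : List Int) (j : Int)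
    (h : ¬ (j ≠ m ∧ 0 ≤ j ∧ j < (ps.length : Int))) : pvStepUp m ps j = j := by
  simp only [pvStepUp, if_neg h]

theorem pvIt_fix_oor (m : Int) (ps : List Int) (j : Int) (k : Nat)
    (_h1 : j ≠ m) (h2 : ¬ (0 ≤ j ∧ j < (ps.length : Int))) : pvIt m ps k j = j :=
  Function.iterate_fixed (pvStepUp_fix m ps j (by tauto)) k

theorem pvReach_cases (m : Int) (ps : List Int) (j : Int) (h : pvReach m ps j) :
    j = m ∨ (0 ≤ j ∧ j < (ps.length : Int)) := by
  by_cases hm : j = m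
  · exact Or.inl hm
  by_cases hr : 0 ≤ j ∧ j < (ps.length : Int)
  · exact Or.inr hr
  obtain ⟨k, hk⟩ := h
  rw [pvIt_fix_oor m ps j k hm hr] at hk
  exact absurd hk hm

theorem pvHit_iff (m : Int) (ps : List Int) (f : Nat) (j : Int) :
    pvHit m ps f j = true ↔ ∃ k ≤ f, pvIt m ps k j = m := by
  induction f generalizing j with
  | zero =>
    constructor
    · intro h; exact ⟨0, le_refl 0, by simpa [pvHit] using h⟩
    · rintro ⟨k, hk, h⟩; interval_cases k; simpa [pvHit] using h
  | succ f ih =>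
    constructor
    · intro h
      rcases (by simpa [pvHit, Bool.or_eq_true, beq_iff_eq] using h :
          j = m ∨ pvHit m ps f (pvStepUp m ps j) = true) with h' | h'
      · exact ⟨0, Nat.zero_le _, h'⟩
      · obtain ⟨k, hk, hit⟩ := (ih _).mp h'
        exact ⟨k + 1, by omega, by rw [pvIt_succ]; exact hit⟩
    · rintro ⟨k, hk, hit⟩
      match k with
      | 0 => simp [pvHit, pvIt_zero] at hit ⊢; exact Or.inl hit
      | k + 1 =>
        simp only [pvHit, Bool.or_eq_true, beq_iff_eq]
        exact Or.inr ((ih _).mpr ⟨k, by omega, by rw [pvIt_succ] at hit; exact hit⟩)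

theorem pvIt_cycle_mul (m : Int) (ps : List Int) (p : Nat) (y : Int)
    (hy : pvIt m ps p y = y) : ∀ q : Nat, pvIt m ps (p * q) y = y := by
  intro q
  induction q with
  | zero => simp [pvIt_zero]
  | succ q ih => rw [Nat.mul_succ, pvIt_add, hy, ih]

theorem pvReach_cycle_eq_m (m : Int) (ps : List Int) (c : Int) (p : Nat)
    (hr : pvReach m ps c) (hc : pvIt m ps p c = c) (hp : 0 < p) : c = m := by
  obtain ⟨k, hk⟩ := hr
  have hle : k ≤ p * k := Nat.le_mul_of_pos_left k hp
  have h1 : pvIt m ps (p * k) c = c := pvIt_cycle_mul m ps p c hc k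
  rw [show p * k = (p * k - k) + k by omega, pvIt_add, hk, pvIt_m] at h1
  exact h1.symm

-- minimal hit time is ≤ n (pigeonhole on the distinct in-range chain values)
theorem pvReach_bound (m : Int) (ps : List Int) (j : Int) (h : pvReach m ps j) :
    ∃ k ≤ ps.length, pvIt m ps k j = m := by
  have hk : pvIt m ps (Nat.find h) j = m := Nat.find_spec h
  have hmin : ∀ t, t < Nat.find h → pvIt m ps t j ≠ m := fun t ht => Nat.find_min h ht
  by_cases hle : Nat.find h ≤ ps.length
  · exact ⟨Nat.find h, hle, hk⟩
  exfalso
  have aux : ∀ a b, a < b → b < Nat.find h → pvIt m ps a j ≠ pvIt m ps b j := by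
    intro a b hab hbk heq
    have h2 : pvIt m ps (Nat.find h) j = pvIt m ps ((Nat.find h - b) + a) j :=
      calc pvIt m ps (Nat.find h) j
          = pvIt m ps ((Nat.find h - b) + b) j := by rw [show (Nat.find h - b) + b = Nat.find h by omega]
        _ = pvIt m ps (Nat.find h - b) (pvIt m ps b j) := pvIt_add m ps _ _ j
        _ = pvIt m ps (Nat.find h - b) (pvIt m ps a j) := by rw [heq]
        _ = pvIt m ps ((Nat.find h - b) + a) j := (pvIt_add m ps _ _ j).symm
    exact hmin _ (by omega) (h2 ▸ hk)
  have hval : ∀ t, t < Nat.find h → pvIt m ps t j ∈ Finset.Ico (0 : Int) (ps.length : Int) := by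
    intro t ht
    have hne : pvIt m ps t j ≠ m := hmin t ht
    by_cases hrange : 0 ≤ pvIt m ps t j ∧ pvIt m ps t j < (ps.length : Int)
    · simpa [Finset.mem_Ico] using hrange
    exfalso
    have h2 : pvIt m ps (Nat.find h) j = pvIt m ps t j := by
      rw [show Nat.find h = (Nat.find h - t) + t by omega, pvIt_add,
        pvIt_fix_oor m ps _ _ hne hrange]
    exact hne (h2 ▸ hk)
  have hinj : Set.InjOn (fun t => pvIt m ps t j) (Finset.range (Nat.find h)) := by
    intro a ha b hb hab
    simp only [Finset.coe_range, Set.mem_Iio] at ha hb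
    rcases lt_trichotomy a b with h' | h' | h'
    · exact absurd hab (aux a b h' hb)
    · exact h'
    · exact absurd hab.symm (aux b a h' ha)
  have hcard := Finset.card_le_card_of_injOn (fun t => pvIt m ps t j)
    (fun t ht => hval t (Finset.mem_range.mp ht)) hinj
  simp only [Finset.card_range] at hcard
  rw [Int.card_Ico] at hcard
  omega

theorem pvReach_iff_hit (m : Int) (ps : List Int) (j : Int) :
    pvReach m ps j ↔ pvHit m ps ps.length j = true := by
  constructor
  · intro h
    exact (pvHit_iff m ps ps.length j).mpr (pvReach_bound m ps j h)
  · intro h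
    obtain ⟨k, _, hk⟩ := (pvHit_iff m ps ps.length j).mp h
    exact ⟨k, hk⟩


-- ---------- A's graph dict ----------

theorem pvChildren_mem (ps : List Int) (v c : Int) :
    c ∈ pvChildren ps v ↔ 0 ≤ c ∧ c < (ps.length : Int) ∧ pvIx ps c = v := by
  simp [pvChildren, List.mem_filter, PySem.List.mem_pyRange_one, PySem.List.len_eq, and_assoc]

theorem pvChildren_nodup (ps : List Int) (v : Int) : (pvChildren ps v).Nodup :=
  (PySem.List.nodup_pyRange_one _ _).filter _

theorem pvBase_getD (l : List Int) (d : PySem.Dict Int (List Int)) (v : Int)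
    (h : ∀ w, d.getD w [] = []) :
    (l.foldl (fun d i => d.insert i ([] : List Int)) d).getD v [] = [] := by
  induction l generalizing d with
  | nil => exact h v
  | cons x xs ih =>
    simp only [List.foldl_cons]
    refine ih _ (fun w => ?_)
    rw [PySem.Dict.getD_insert]
    split <;> [rfl; exact h w]

theorem pvBase_keys (l : List Int) (d : PySem.Dict Int (List Int)) (v : Int) :
    v ∈ (l.foldl (fun d i => d.insert i ([] : List Int)) d).keys ↔ v ∈ d.keys ∨ v ∈ l := by
  induction l generalizing d with
  | nil => simp
  | cons x xs ih =>
    simp only [List.foldl_cons, ih, PySem.Dict.mem_keys_insert, List.mem_cons]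
    tauto

theorem pvModifyFold_keys (l : List (Int × Int)) (d : PySem.Dict Int (List Int)) (v : Int) :
    v ∈ (l.foldl (fun d p => d.modify p.2 [] (fun s => s ++ [p.1])) d).keys ↔
      v ∈ d.keys ∨ v ∈ l.map (fun p => p.2) := by
  induction l generalizing d with
  | nil => simp
  | cons x xs ih =>
    simp only [List.foldl_cons, ih, List.map_cons, List.mem_cons]
    rw [← PySem.Dict.contains_iff_mem_keys, PySem.Dict.contains_modify,
      Bool.or_eq_true, beq_iff_eq, PySem.Dict.contains_iff_mem_keys]
    tauto

theorem pvFoldSwap (l : List (Int × Int)) (d : PySem.Dict Int (List Int)) :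
    l.foldl (fun d p => d.modify p.2 [] (fun s => s ++ [p.1])) d
      = (l.map (fun p => (p.2, p.1))).foldl (fun d p => d.modify p.1 [] (fun s => s ++ [p.2])) d := by
  induction l generalizing d with
  | nil => rfl
  | cons x xs ih => simp only [List.foldl_cons, List.map_cons]; exact ih _

theorem pvGraph_getD (ps : List Int) (v : Int) :
    (pvGraph ps).getD v [] = pvChildren ps v := by
  unfold pvGraph
  rw [pvFoldSwap]
  rw [PySem.Dict.getD_foldl_modify_append]
  rw [pvBase_getD _ _ _ (fun w => by rw [PySem.Dict.getD_eq_get?_getD, PySem.Dict.get?_empty]; rfl)]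
  rw [show PySem.List.enumerate ps 0 = PySem.List.enumerate ps from rfl,
    PySem.List.enumerate_eq_map_pyRange ps 0, List.map_map, List.filter_map, List.map_map]
  simp only [pvChildren, pvIx, List.nil_append, Function.comp_def]
  simp

theorem pvGraph_contains (ps : List Int) (v : Int) :
    (pvGraph ps).contains v = true ↔ (0 ≤ v ∧ v < (ps.length : Int)) ∨ v ∈ ps := by
  rw [PySem.Dict.contains_iff_mem_keys]
  unfold pvGraph
  rw [pvModifyFold_keys, pvBase_keys]
  rw [PySem.List.map_snd_enumerate]
  simp [PySem.Dict.keys_empty, PySem.List.mem_pyRange_one, PySem.List.len_eq]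

theorem pvGraph_get? (ps : List Int) (v : Int)
    (h : (0 ≤ v ∧ v < (ps.length : Int)) ∨ v ∈ ps) :
    (pvGraph ps).get? v = some (pvChildren ps v) := by
  have hc : (pvGraph ps).contains v = true := (pvGraph_contains ps v).mpr h
  cases hg : (pvGraph ps).get? v with
  | none => rw [PySem.Dict.get?_eq_none_iff_contains] at hg; rw [hg] at hc; cases hc
  | some x =>
    have h2 := pvGraph_getD ps v
    rw [PySem.Dict.getD_eq_get?_getD, hg, Option.getD_some] at h2
    rw [h2]

-- ---------- path sums and hit times ----------

def pvPS (m : Int) (ps ds : List Int) : Nat → Int → Int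
  | 0, _ => 0
  | f + 1, j => if j = m then pvIx ds m else pvIx ds j + pvPS m ps ds f (pvStepUp m ps j)

def pvSum (m : Int) (ps ds : List Int) (j : Int) : Int := pvPS m ps ds (ps.length + 1) j

noncomputable def pvHt (m : Int) (ps : List Int) (j : Int) : Nat :=
  @dite Nat (pvReach m ps j) (Classical.dec _)
    (fun h => @Nat.find (fun k => pvIt m ps k j = m) (fun _ => inferInstance) h) (fun _ => 0)

theorem pvPS_succ (m : Int) (ps ds : List Int) (f : Nat) (j : Int) :
    pvPS m ps ds (f + 1) j
      = if j = m then pvIx ds m else pvIx ds j + pvPS m ps ds f (pvStepUp m ps j) := rfl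

theorem pvHt_spec (m : Int) (ps : List Int) (j : Int) (h : pvReach m ps j) :
    pvIt m ps (pvHt m ps j) j = m ∧ ∀ t < pvHt m ps j, pvIt m ps t j ≠ m := by
  rw [pvHt, dif_pos h]
  exact ⟨Nat.find_spec h, fun t ht => Nat.find_min h ht⟩

theorem pvHt_le_of_it (m : Int) (ps : List Int) (j : Int) (h : pvReach m ps j) (k : Nat)
    (hk : pvIt m ps k j = m) : pvHt m ps j ≤ k := by
  rw [pvHt, dif_pos h]; exact Nat.find_min' h hk

theorem pvHt_le (m : Int) (ps : List Int) (j : Int) (h : pvReach m ps j) :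
    pvHt m ps j ≤ ps.length := by
  obtain ⟨k, hk, hit⟩ := pvReach_bound m ps j h
  exact le_trans (pvHt_le_of_it m ps j h k hit) hk

theorem pvHt_step (m : Int) (ps : List Int) (j : Int) (hr : pvReach m ps j) (hj : j ≠ m) :
    pvReach m ps (pvStepUp m ps j) ∧ pvHt m ps (pvStepUp m ps j) + 1 = pvHt m ps j := by
  obtain ⟨hit, hmin⟩ := pvHt_spec m ps j hr
  have h1 : 1 ≤ pvHt m ps j := by
    rcases Nat.eq_zero_or_pos (pvHt m ps j) with h | h
    · rw [h, pvIt_zero] at hit; exact absurd hit hj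
    · exact h
  have hstep : pvIt m ps (pvHt m ps j - 1) (pvStepUp m ps j) = m := by
    have h2 := hit
    rw [show pvHt m ps j = (pvHt m ps j - 1) + 1 by omega, pvIt_succ] at h2
    exact h2
  have hrs : pvReach m ps (pvStepUp m ps j) := ⟨_, hstep⟩
  have hle : pvHt m ps (pvStepUp m ps j) ≤ pvHt m ps j - 1 := pvHt_le_of_it m ps _ hrs _ hstep
  have hge : pvHt m ps j ≤ pvHt m ps (pvStepUp m ps j) + 1 := by
    have h3 := (pvHt_spec m ps _ hrs).1
    exact pvHt_le_of_it m ps j hr _ (by rw [pvIt_succ]; exact h3)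
  exact ⟨hrs, by omega⟩

theorem pvPS_stable (m : Int) (ps ds : List Int) :
    ∀ (k : Nat) (j : Int) (f : Nat), pvIt m ps k j = m → k ≤ f →
      pvPS m ps ds (f + 1) j = pvPS m ps ds (k + 1) j := by
  intro k
  induction k with
  | zero =>
    intro j f hit _
    rw [pvIt_zero] at hit
    subst hit
    cases f <;> simp [pvPS]
  | succ k ih =>
    intro j f hit hf
    by_cases hj : j = m
    · subst hj
      obtain ⟨f', rfl⟩ : ∃ f', f = f' + 1 := ⟨f - 1, by omega⟩
      simp [pvPS]
    · obtain ⟨f', rfl⟩ : ∃ f', f = f' + 1 := ⟨f - 1, by omega⟩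
      rw [pvIt_succ] at hit
      rw [pvPS_succ m ps ds (f' + 1) j, pvPS_succ m ps ds (k + 1) j, if_neg hj, if_neg hj,
        ih (pvStepUp m ps j) f' hit (by omega)]

theorem pvSum_m (m : Int) (ps ds : List Int) : pvSum m ps ds m = pvIx ds m := by
  simp [pvSum, pvPS]

theorem pvSum_step (m : Int) (ps ds : List Int) (j : Int)
    (hr : pvReach m ps j) (hj : j ≠ m) :
    pvSum m ps ds j = pvIx ds j + pvSum m ps ds (pvStepUp m ps j) := by
  have hrange : 0 ≤ j ∧ j < (ps.length : Int) := by
    rcases pvReach_cases m ps j hr with h | h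
    · exact absurd h hj
    · exact h
  have hn : 1 ≤ ps.length := by
    rcases hrange with ⟨h0, hlt⟩
    omega
  obtain ⟨hrs, hht⟩ := pvHt_step m ps j hr hj
  have hle := pvHt_le m ps j hr
  have hhts := (pvHt_spec m ps _ hrs).1
  have hs2 : pvPS m ps ds (ps.length + 1) (pvStepUp m ps j)
      = pvPS m ps ds (pvHt m ps (pvStepUp m ps j) + 1) (pvStepUp m ps j) :=
    pvPS_stable m ps ds _ _ _ hhts (by omega)
  have hs1 : pvPS m ps ds ps.length (pvStepUp m ps j)
      = pvPS m ps ds (pvHt m ps (pvStepUp m ps j) + 1) (pvStepUp m ps j) := by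
    rw [show ps.length = (ps.length - 1) + 1 by omega]
    exact pvPS_stable m ps ds _ _ _ hhts (by omega)
  rw [pvSum, pvPS_succ, if_neg hj, hs1]
  rw [pvSum, hs2]

theorem pvNoChild_m (m : Int) (ps : List Int) (c ch : Int)
    (hnc : (0 ≤ m ∧ m < (ps.length : Int)) → pvHit m ps ps.length (pvIx ps m) = false)
    (hch : ch ∈ pvChildren ps c) (hr : pvReach m ps c) : ch ≠ m := by
  intro he
  obtain ⟨h0, hlt, hpx⟩ := (pvChildren_mem ps c ch).mp hch
  rw [he] at h0 hlt hpx
  have hf := hnc ⟨h0, hlt⟩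
  rw [hpx, (pvReach_iff_hit m ps c).mp hr] at hf
  cases hf

theorem pvChild_step (m : Int) (ps : List Int) (c ch : Int)
    (hch : ch ∈ pvChildren ps c) (hne : ch ≠ m) : pvStepUp m ps ch = c := by
  obtain ⟨h0, hlt, hpx⟩ := (pvChildren_mem ps c ch).mp hch
  rw [pvStepUp, if_pos ⟨hne, h0, hlt⟩, hpx]

theorem pvChild_reach (m : Int) (ps : List Int) (c ch : Int)
    (hch : ch ∈ pvChildren ps c) (hne : ch ≠ m) (hr : pvReach m ps c) :
    pvReach m ps ch := by
  obtain ⟨k, hk⟩ := hr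
  exact ⟨k + 1, by rw [pvIt_succ, pvChild_step m ps c ch hch hne, hk]⟩

theorem pvChild_ht (m : Int) (ps : List Int) (c ch : Int)
    (hch : ch ∈ pvChildren ps c) (hne : ch ≠ m) (hr : pvReach m ps c) :
    pvHt m ps ch = pvHt m ps c + 1 := by
  have hrch := pvChild_reach m ps c ch hch hne hr
  have h := pvHt_step m ps ch hrch hne
  rw [pvChild_step m ps c ch hch hne] at h
  omega

theorem pvChild_sum (m : Int) (ps ds : List Int) (c ch : Int)
    (hch : ch ∈ pvChildren ps c) (hne : ch ≠ m) (hr : pvReach m ps c) :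
    pvSum m ps ds ch = pvIx ds ch + pvSum m ps ds c := by
  have hrch := pvChild_reach m ps c ch hch hne hr
  rw [pvSum_step m ps ds ch hrch hne, pvChild_step m ps c ch hch hne]

-- ---------- BFS subtrees ----------

theorem pvIt_succ' (m : Int) (ps : List Int) (k : Nat) (j : Int) :
    pvIt m ps (k + 1) j = pvStepUp m ps (pvIt m ps k j) := by
  simp [pvIt, Function.iterate_succ_apply']

def pvSub (ps : List Int) : Nat → Int → List Int
  | 0, _ => []
  | f + 1, c => c :: (pvChildren ps c).flatMap (fun ch => pvSub ps f ch)

theorem pvSub_succ (ps : List Int) (f : Nat) (c : Int) :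
    pvSub ps (f + 1) c = c :: (pvChildren ps c).flatMap (fun ch => pvSub ps f ch) := rfl

-- membership: j is in the f-bounded subtree below c iff its chain reaches c in < f steps
theorem pvSub_mem (m : Int) (ps : List Int)
    (hnc : (0 ≤ m ∧ m < (ps.length : Int)) → pvHit m ps ps.length (pvIx ps m) = false) :
    ∀ (f : Nat) (c j : Int), pvReach m ps c →
      (j ∈ pvSub ps f c ↔ ∃ t < f, pvIt m ps t j = c) := by
  intro f
  induction f with
  | zero => intro c j _; simp [pvSub]
  | succ f ih =>
    intro c j hr
    rw [pvSub_succ]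
    constructor
    · intro hmem
      rcases List.mem_cons.mp hmem with he | hflat
      · exact ⟨0, by omega, by rw [pvIt_zero, he]⟩
      · obtain ⟨ch, hch, hj⟩ := List.mem_flatMap.mp hflat
        have hne := pvNoChild_m m ps c ch hnc hch hr
        have hrch := pvChild_reach m ps c ch hch hne hr
        obtain ⟨t, ht, hit⟩ := (ih ch j hrch).mp hj
        refine ⟨t + 1, by omega, ?_⟩
        rw [pvIt_succ', hit, pvChild_step m ps c ch hch hne]
    · rintro ⟨t, ht, hit⟩
      have hex : ∃ u, pvIt m ps u j = c := ⟨t, hit⟩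
      have hspec := Nat.find_spec hex
      have hmin := fun u (hu : u < Nat.find hex) => Nat.find_min hex hu
      have hfind_le : Nat.find hex ≤ t := Nat.find_min' hex hit
      cases hfz : Nat.find hex with
      | zero =>
        rw [hfz, pvIt_zero] at hspec
        exact List.mem_cons.mpr (Or.inl hspec)
      | succ t0 =>
        rw [hfz] at hspec
        have hw : pvStepUp m ps (pvIt m ps t0 j) = c := by
          rw [← pvIt_succ']; exact hspec
        have hwne_c : pvIt m ps t0 j ≠ c := hmin t0 (by omega)
        have hwne_m : pvIt m ps t0 j ≠ m := by
          intro he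
          rw [he, pvStepUp_m] at hw
          exact hwne_c (by rw [he, ← hw])
        have hwrange : 0 ≤ pvIt m ps t0 j ∧ pvIt m ps t0 j < (ps.length : Int) := by
          by_cases h : 0 ≤ pvIt m ps t0 j ∧ pvIt m ps t0 j < (ps.length : Int)
          · exact h
          · exfalso
            rw [pvStepUp_fix m ps _ (by tauto)] at hw
            exact hwne_c hw
        have hpx : pvIx ps (pvIt m ps t0 j) = c := by
          rw [pvStepUp, if_pos ⟨hwne_m, hwrange.1, hwrange.2⟩] at hw
          exact hw
        have hch : pvIt m ps t0 j ∈ pvChildren ps c :=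
          (pvChildren_mem ps c _).mpr ⟨hwrange.1, hwrange.2, hpx⟩
        have hrch : pvReach m ps (pvIt m ps t0 j) :=
          pvChild_reach m ps c _ hch hwne_m hr
        refine List.mem_cons.mpr (Or.inr (List.mem_flatMap.mpr ⟨pvIt m ps t0 j, hch, ?_⟩))
        exact (ih _ j hrch).mpr ⟨t0, by omega, rfl⟩

-- two distinct children have disjoint subtrees
theorem pvSub_disj (m : Int) (ps : List Int)
    (hnc : (0 ≤ m ∧ m < (ps.length : Int)) → pvHit m ps ps.length (pvIx ps m) = false)
    (c ch1 ch2 : Int) (hr : pvReach m ps c)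
    (h1 : ch1 ∈ pvChildren ps c) (h2 : ch2 ∈ pvChildren ps c) (hne : ch1 ≠ ch2)
    (f1 f2 : Nat) (j : Int) (hj1 : j ∈ pvSub ps f1 ch1) (hj2 : j ∈ pvSub ps f2 ch2) :
    False := by
  have hm1 := pvNoChild_m m ps c ch1 hnc h1 hr
  have hm2 := pvNoChild_m m ps c ch2 hnc h2 hr
  have hr1 := pvChild_reach m ps c ch1 h1 hm1 hr
  have hr2 := pvChild_reach m ps c ch2 h2 hm2 hr
  obtain ⟨t1, _, hit1⟩ := (pvSub_mem m ps hnc f1 ch1 j hr1).mp hj1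
  obtain ⟨t2, _, hit2⟩ := (pvSub_mem m ps hnc f2 ch2 j hr2).mp hj2
  -- wlog-free core applied in both orders
  have core : ∀ (a b : Int) (ta tb : Nat), a ∈ pvChildren ps c → b ∈ pvChildren ps c →
      b ≠ m → pvIt m ps ta j = a → pvIt m ps tb j = b → ta < tb → False := by
    intro a b ta tb hac hbc hbm hita hitb hlt
    have ham : a ≠ m := pvNoChild_m m ps c a hnc hac hr
    have hu : pvIt m ps (tb - ta) a = b := by
      rw [← hita, ← pvIt_add]
      rw [show tb - ta + ta = tb by omega]
      exact hitb
    have hu1 : 1 ≤ tb - ta := by omega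
    have hb' : pvIt m ps (tb - ta - 1) c = b := by
      rw [show tb - ta = (tb - ta - 1) + 1 by omega, pvIt_succ,
        pvChild_step m ps c a hac ham] at hu
      exact hu
    have hcyc : pvIt m ps (tb - ta) c = c := by
      rw [show tb - ta = (tb - ta - 1) + 1 by omega, pvIt_succ', hb',
        pvChild_step m ps c b hbc hbm]
    have hcm : c = m := pvReach_cycle_eq_m m ps c (tb - ta) hr hcyc (by omega)
    rw [hcm, pvIt_m] at hb'
    exact hbm hb'.symm
  rcases lt_trichotomy t1 t2 with h | h | h
  · exact core ch1 ch2 t1 t2 h1 h2 hm2 hit1 hit2 h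
  · exact hne (by rw [← hit1, ← hit2, h])
  · exact core ch2 ch1 t2 t1 h2 h1 hm1 hit2 hit1 h

theorem pvSub_nodup (m : Int) (ps : List Int)
    (hnc : (0 ≤ m ∧ m < (ps.length : Int)) → pvHit m ps ps.length (pvIx ps m) = false) :
    ∀ (f : Nat) (c : Int), pvReach m ps c → (pvSub ps f c).Nodup := by
  intro f
  induction f with
  | zero => intro c _; simp [pvSub]
  | succ f ih =>
    intro c hr
    rw [pvSub_succ]
    refine List.Nodup.cons ?_ ?_
    · intro hcmem
      obtain ⟨ch, hch, hj⟩ := List.mem_flatMap.mp hcmem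
      have hne := pvNoChild_m m ps c ch hnc hch hr
      have hrch := pvChild_reach m ps c ch hch hne hr
      obtain ⟨t, _, hit⟩ := (pvSub_mem m ps hnc f ch c hrch).mp hj
      have hcyc : pvIt m ps (t + 1) c = c := by
        rw [pvIt_succ', hit, pvChild_step m ps c ch hch hne]
      have hcm : c = m := pvReach_cycle_eq_m m ps c (t + 1) hr hcyc (by omega)
      rw [hcm, pvIt_m] at hit
      exact hne hit.symm
    · rw [List.nodup_flatMap]
      constructor
      · intro ch hch
        exact ih ch (pvChild_reach m ps c ch hch (pvNoChild_m m ps c ch hnc hch hr) hr)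
      · refine List.Pairwise.imp_of_mem ?_ (pvChildren_nodup ps c)
        intro a b ha hb hab
        have : List.Disjoint (pvSub ps f a) (pvSub ps f b) := by
          rw [List.disjoint_left]
          intro j hj1 hj2
          exact pvSub_disj m ps hnc c a b hr ha hb hab f f j hj1 hj2
        exact this

-- size bound: a subtree below a reachable node has at most n+1 (distinct) nodes
theorem pvSub_len (m : Int) (ps : List Int)
    (hnc : (0 ≤ m ∧ m < (ps.length : Int)) → pvHit m ps ps.length (pvIx ps m) = false)
    (f : Nat) (c : Int) (hr : pvReach m ps c) :
    (pvSub ps f c).length ≤ ps.length + 1 := by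
  have hnd := pvSub_nodup m ps hnc f c hr
  have hsub : (pvSub ps f c).toFinset ⊆ insert m (Finset.Ico (0 : Int) (ps.length : Int)) := by
    intro j hj
    rw [List.mem_toFinset] at hj
    obtain ⟨t, _, hit⟩ := (pvSub_mem m ps hnc f c j hr).mp hj
    have hrj : pvReach m ps j := by
      obtain ⟨k, hk⟩ := hr
      exact ⟨k + t, by rw [pvIt_add, hit, hk]⟩
    rcases pvReach_cases m ps j hrj with h | h
    · simp [h]
    · simp [Finset.mem_Ico, h]
  have hcard := Finset.card_le_card hsub
  rw [List.toFinset_card_of_nodup hnd] at hcard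
  have hins := Finset.card_insert_le m (Finset.Ico (0 : Int) (ps.length : Int))
  rw [Int.card_Ico] at hins
  omega

-- ---------- fold-max algebra ----------

def pvFMax (a : Int) (l : List Int) : Int := l.foldl max a

theorem pvFMax_base (a : Int) (l : List Int) : a ≤ pvFMax a l :=
  (PySem.List.le_foldl_max l a).1

theorem pvFMax_mem (a x : Int) (l : List Int) (h : x ∈ l) : x ≤ pvFMax a l :=
  (PySem.List.le_foldl_max l a).2 x h

theorem pvFMax_le (a b : Int) (l : List Int) (ha : a ≤ b) (hl : ∀ x ∈ l, x ≤ b) :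
    pvFMax a l ≤ b := by
  induction l generalizing a with
  | nil => exact ha
  | cons x xs ih =>
    exact ih (max a x) (max_le ha (hl x (List.mem_cons_self))) (fun y hy => hl y (List.mem_cons_of_mem _ hy))

theorem pvFMax_cons (a x : Int) (l : List Int) : pvFMax a (x :: l) = pvFMax (max a x) l := rfl

theorem pvFMax_append (a : Int) (l1 l2 : List Int) :
    pvFMax a (l1 ++ l2) = pvFMax (pvFMax a l1) l2 := by
  simp [pvFMax, List.foldl_append]

theorem pvFMax_max (a b : Int) (l : List Int) :
    pvFMax (max a b) l = max a (pvFMax b l) := by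
  induction l generalizing b with
  | nil => rfl
  | cons x xs ih =>
    rw [pvFMax_cons, pvFMax_cons, max_assoc, ih]

-- ---------- subtree stability, subtree maxima ----------

theorem pvSub_stab (m : Int) (ps : List Int)
    (hnc : (0 ≤ m ∧ m < (ps.length : Int)) → pvHit m ps ps.length (pvIx ps m) = false) :
    ∀ (d : Nat) (c : Int), pvReach m ps c → ps.length - pvHt m ps c ≤ d →
      ∀ f1 f2 : Nat, ps.length - pvHt m ps c < f1 → ps.length - pvHt m ps c < f2 →
        pvSub ps f1 c = pvSub ps f2 c := by
  intro d
  induction d with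
  | zero =>
    intro c hr hd f1 f2 h1 h2
    have hempty : pvChildren ps c = [] := by
      rw [List.eq_nil_iff_forall_not_mem]
      intro ch hch
      have hne := pvNoChild_m m ps c ch hnc hch hr
      have hrch := pvChild_reach m ps c ch hch hne hr
      have hht := pvChild_ht m ps c ch hch hne hr
      have hle := pvHt_le m ps ch hrch
      omega
    obtain ⟨g1, rfl⟩ : ∃ g, f1 = g + 1 := ⟨f1 - 1, by omega⟩
    obtain ⟨g2, rfl⟩ : ∃ g, f2 = g + 1 := ⟨f2 - 1, by omega⟩
    rw [pvSub_succ, pvSub_succ, hempty]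
    simp
  | succ d ih =>
    intro c hr hd f1 f2 h1 h2
    obtain ⟨g1, rfl⟩ : ∃ g, f1 = g + 1 := ⟨f1 - 1, by omega⟩
    obtain ⟨g2, rfl⟩ : ∃ g, f2 = g + 1 := ⟨f2 - 1, by omega⟩
    rw [pvSub_succ, pvSub_succ]
    congr 1
    refine List.flatMap_congr (fun ch hch => ?_)
    have hne := pvNoChild_m m ps c ch hnc hch hr
    have hrch := pvChild_reach m ps c ch hch hne hr
    have hht := pvChild_ht m ps c ch hch hne hr
    have hle := pvHt_le m ps ch hrch
    exact ih ch hrch (by omega) g1 g2 (by omega) (by omega)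

theorem pvSub_stab_n (m : Int) (ps : List Int)
    (hnc : (0 ≤ m ∧ m < (ps.length : Int)) → pvHit m ps ps.length (pvIx ps m) = false)
    (c : Int) (hr : pvReach m ps c) (h1 : 1 ≤ pvHt m ps c) :
    pvSub ps ps.length c = pvSub ps (ps.length + 1) c := by
  have hle := pvHt_le m ps c hr
  exact pvSub_stab m ps hnc (ps.length - pvHt m ps c) c hr (le_refl _) _ _ (by omega) (by omega)

def pvMax (m : Int) (ps ds : List Int) (c : Int) : Int :=
  pvFMax (pvSum m ps ds c) ((pvSub ps (ps.length + 1) c).map (pvSum m ps ds))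

theorem pvFMax_flat (a : Int) (l : List Int) (h : Int → List Int) :
    pvFMax a (l.flatMap h) = l.foldl (fun acc x => pvFMax acc (h x)) a := by
  induction l generalizing a with
  | nil => rfl
  | cons x xs ih => rw [List.flatMap_cons, pvFMax_append, List.foldl_cons, ih]

theorem pvFMax_map_max (a : Int) (l : List Int) (h : Int → Int) :
    pvFMax a (l.map h) = l.foldl (fun acc x => max acc (h x)) a := by
  induction l generalizing a with
  | nil => rfl
  | cons x xs ih => rw [List.map_cons, pvFMax_cons, List.foldl_cons, ih]

-- pvMax of a reachable node decomposes through its children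
theorem pvFoldl_congr (l : List Int) (a : Int) (f g : Int → Int → Int)
    (h : ∀ acc : Int, ∀ x ∈ l, f acc x = g acc x) : l.foldl f a = l.foldl g a := by
  induction l generalizing a with
  | nil => rfl
  | cons x xs ih =>
    rw [List.foldl_cons, List.foldl_cons, h a x List.mem_cons_self]
    exact ih _ (fun acc y hy => h acc y (List.mem_cons_of_mem _ hy))

-- pvMax of a reachable node decomposes through its children
theorem pvMax_dec (m : Int) (ps ds : List Int)
    (hnc : (0 ≤ m ∧ m < (ps.length : Int)) → pvHit m ps ps.length (pvIx ps m) = false)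
    (c : Int) (hr : pvReach m ps c) :
    pvMax m ps ds c = pvFMax (pvSum m ps ds c) ((pvChildren ps c).map (pvMax m ps ds)) := by
  rw [pvMax, pvSub_succ, List.map_cons, pvFMax_cons, max_self, List.map_flatMap, pvFMax_flat,
    pvFMax_map_max]
  refine pvFoldl_congr _ _ _ _ ?_
  intro acc ch hch
  have hne := pvNoChild_m m ps c ch hnc hch hr
  have hrch := pvChild_reach m ps c ch hch hne hr
  have hht := pvChild_ht m ps c ch hch hne hr
  rw [pvSub_stab_n m ps hnc ch hrch (by omega)]
  rw [pvSub_succ, List.map_cons, pvFMax_cons]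
  rw [pvFMax_max]
  rw [pvMax, pvSub_succ, List.map_cons, pvFMax_cons, max_self]

-- ---------- evaluating A's BFS ----------

theorem pvBfs_eval (m : Int) (ps ds : List Int)
    (hkey : (0 ≤ m ∧ m < (ps.length : Int)) ∨ m ∈ ps)
    (hnc : (0 ≤ m ∧ m < (ps.length : Int)) → pvHit m ps ps.length (pvIx ps m) = false) :
    ∀ (F : Nat) (q : List (Int × Int)) (s : Int),
      (∀ p ∈ q, pvReach m ps p.1 ∧ p.2 = pvSum m ps ds p.1) →
      (q.map (fun p => (pvSub ps (ps.length + 1) p.1).length)).sum < F →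
      pvBfs ds (pvGraph ps) F q s = pvFMax s (q.map (fun p => pvMax m ps ds p.1)) := by
  intro F
  induction F with
  | zero => intro q s _ hF; exact absurd hF (Nat.not_lt_zero _)
  | succ F ih =>
    intro q s hq hF
    match q with
    | [] => rfl
    | (c, d) :: q' =>
      obtain ⟨hrc0, hd0⟩ := hq _ List.mem_cons_self
      have hrc : pvReach m ps c := hrc0
      have hd : d = pvSum m ps ds c := hd0
      have hcon : (0 ≤ c ∧ c < (ps.length : Int)) ∨ c ∈ ps := by
        rcases pvReach_cases m ps c hrc with h | h
        · rw [h]; exact hkey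
        · exact Or.inl h
      have hbfs : pvBfs ds (pvGraph ps) (F + 1) ((c, d) :: q') s
          = pvBfs ds (pvGraph ps) F
              (q' ++ (pvChildren ps c).map (fun ch => (ch, d + pvIx ds ch))) (max s d) := by
        rw [pvBfs, pvGraph_get? ps c hcon]
      rw [hbfs]
      have hnew : ∀ p ∈ q' ++ (pvChildren ps c).map (fun ch => (ch, d + pvIx ds ch)),
          pvReach m ps p.1 ∧ p.2 = pvSum m ps ds p.1 := by
        intro p hp
        rcases List.mem_append.mp hp with h | h
        · exact hq p (List.mem_cons_of_mem _ h)
        · obtain ⟨ch, hch, rfl⟩ := List.mem_map.mp h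
          have hne := pvNoChild_m m ps c ch hnc hch hrc
          refine ⟨pvChild_reach m ps c ch hch hne hrc, ?_⟩
          rw [pvChild_sum m ps ds c ch hch hne hrc, hd]
          ring
      have hlen : ((q' ++ (pvChildren ps c).map (fun ch => (ch, d + pvIx ds ch))).map
          (fun p => (pvSub ps (ps.length + 1) p.1).length)).sum
          + 1
          = ((((c, d) :: q').map (fun p => (pvSub ps (ps.length + 1) p.1).length)).sum) := by
        rw [List.map_append, List.sum_append, List.map_cons, List.sum_cons, List.map_map]
        have hhead : (pvSub ps (ps.length + 1) c).length
            = 1 + ((pvChildren ps c).map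
                (fun ch => (pvSub ps (ps.length + 1) ch).length)).sum := by
          rw [pvSub_succ, List.length_cons, List.length_flatMap]
          have : ∀ ch ∈ pvChildren ps c,
              (pvSub ps ps.length ch).length = (pvSub ps (ps.length + 1) ch).length := by
            intro ch hch
            have hne := pvNoChild_m m ps c ch hnc hch hrc
            have hrch := pvChild_reach m ps c ch hch hne hrc
            have hht := pvChild_ht m ps c ch hch hne hrc
            rw [pvSub_stab_n m ps hnc ch hrch (by omega)]
          rw [List.map_congr_left this]
          omega
        rw [hhead]
        have hcomp : ((pvChildren ps c).map
              ((fun p => (pvSub ps (ps.length + 1) (Prod.fst p)).length)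
                ∘ (fun ch => (ch, d + pvIx ds ch)))).sum
            = ((pvChildren ps c).map (fun ch => (pvSub ps (ps.length + 1) ch).length)).sum := rfl
        omega
      rw [ih _ (max s d) hnew (by omega)]
      -- fold-max algebra
      rw [List.map_append, pvFMax_append, List.map_map]
      have hmapnew : ((pvChildren ps c).map
          ((fun p => pvMax m ps ds (Prod.fst p)) ∘ (fun ch => (ch, d + pvIx ds ch))))
          = (pvChildren ps c).map (pvMax m ps ds) := rfl
      rw [hmapnew, hd]
      rw [max_comm s (pvSum m ps ds c), pvFMax_max]
      rw [max_comm (pvSum m ps ds c) (pvFMax s (q'.map fun p => pvMax m ps ds p.1)), pvFMax_max]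
      rw [← pvMax_dec m ps ds hnc c hrc]
      rw [List.map_cons, pvFMax_cons]
      rw [max_comm s (pvMax m ps ds c), pvFMax_max]
      exact max_comm _ _

-- ---------- A evaluated ----------

theorem pvReach_m (m : Int) (ps : List Int) : pvReach m ps m := ⟨0, rfl⟩

theorem pvA_eval (m : Int) (ps ds : List Int) (hpre : Pre_total_time m ps ds) :
    total_time m ps ds = max 0 (pvMax m ps ds m) := by
  obtain ⟨hkey, hin, hnc, _⟩ := hpre
  obtain ⟨v, hv⟩ : ∃ v, PySem.List.pyGet? ds m = some v := by
    cases h : PySem.List.pyGet? ds m with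
    | none => rw [PySem.List.pyGet?_eq_none_iff] at h; exact absurd hin h
    | some v => exact ⟨v, rfl⟩
  have hvix : v = pvIx ds m := by
    rw [show pvIx ds m = (PySem.List.pyGet? ds m).getD 0 from by
      simp [pvIx, PySem.List.pyGetD, PySem.List.pyGet?], hv, Option.getD_some]
  rw [total_time, hv]
  have heval := pvBfs_eval m ps ds hkey hnc (ps.length + 2) [(m, v)] 0
    (by
      intro p hp
      rcases List.mem_singleton.mp hp with rfl
      exact ⟨pvReach_m m ps, by rw [hvix, pvSum_m]⟩)
    (by
      have := pvSub_len m ps hnc (ps.length + 1) m (pvReach_m m ps)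
      simp only [List.map_cons, List.map_nil, List.sum_cons, List.sum_nil]
      omega)
  show pvBfs ds (pvGraph ps) (ps.length + 2) [(m, v)] 0 = max 0 (pvMax m ps ds m)
  rw [heval]
  rfl

-- ---------- B's walk: stopping time and chain shape ----------

def pvSound (m : Int) (ps ds : List Int) (memo : PySem.Dict Int (Option Int)) : Prop :=
  ∀ j v, memo.get? j = some v → j ≠ m ∧ 0 ≤ j ∧ j < (ps.length : Int) ∧
    v = (if pvHit m ps ps.length j then some (pvSum m ps ds j) else none)

-- the walk from i stops at step t
def pvStopP (m : Int) (ps : List Int) (memo : PySem.Dict Int (Option Int)) (i : Int) (t : Nat) : Prop :=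
  pvIt m ps t i = m ∨ ¬ (0 ≤ pvIt m ps t i ∧ pvIt m ps t i < (ps.length : Int)) ∨
    memo.contains (pvIt m ps t i) = true ∨ ∃ a < t, pvIt m ps a i = pvIt m ps t i

theorem pvStop_exists (m : Int) (ps : List Int) (memo : PySem.Dict Int (Option Int)) (i : Int) :
    ∃ t ≤ ps.length, pvStopP m ps memo i t := by
  by_contra hno
  push Not at hno
  have hgood : ∀ t ≤ ps.length, ¬ pvStopP m ps memo i t := hno
  have hval : ∀ t, t ≤ ps.length → pvIt m ps t i ∈ Finset.Ico (0 : Int) (ps.length : Int) := by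
    intro t ht
    have h := hgood t ht
    rw [pvStopP] at h
    push Not at h
    simpa [Finset.mem_Ico] using h.2.1
  have hinj : Set.InjOn (fun t => pvIt m ps t i) (Finset.range (ps.length + 1)) := by
    intro a ha b hb hab
    simp only [Finset.coe_range, Set.mem_Iio] at ha hb
    rcases lt_trichotomy a b with h | h | h
    · exfalso
      have hg := hgood b (by omega)
      rw [pvStopP] at hg
      push Not at hg
      exact hg.2.2.2 a h hab
    · exact h
    · exfalso
      have hg := hgood a (by omega)
      rw [pvStopP] at hg
      push Not at hg
      exact hg.2.2.2 b h hab.symm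
  have hcard := Finset.card_le_card_of_injOn (fun t => pvIt m ps t i)
    (fun t ht => hval t (by simpa [Finset.mem_range, Nat.lt_succ_iff] using ht)) hinj
  simp only [Finset.card_range] at hcard
  rw [Int.card_Ico] at hcard
  omega

theorem pvSet_add_fresh (s : PySem.Set Int) (x : Int) (h : ¬ x ∈ s) :
    PySem.Set.add s x = s ++ [x] := by
  simp [PySem.Set.add, h]

theorem pvWalk_go (m : Int) (ps : List Int) (memo : PySem.Dict Int (Option Int)) (i : Int)
    (L : Nat) (hPL : pvStopP m ps memo i L) (hmin : ∀ t < L, ¬ pvStopP m ps memo i t) :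
    ∀ (f t : Nat), t ≤ L → L - t < f →
      pvWalk m ps memo f ((List.range t).map (fun a => pvIt m ps a i))
          ((List.range t).map (fun a => pvIt m ps a i)) (pvIt m ps t i)
        = ((List.range L).map (fun a => pvIt m ps a i), pvIt m ps L i) := by
  intro f
  induction f with
  | zero => intro t _ h; omega
  | succ f ih =>
    intro t hle hf
    rw [pvWalk]
    by_cases ht : t = L
    · subst ht
      rw [if_neg]
      intro ⟨h1, h2, h3, h4, h5⟩
      rcases hPL with h | h | h | h
      · exact h1 h
      · exact h ⟨h2, h3⟩
      · rw [h] at h4; cases h4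
      · obtain ⟨a, ha, hae⟩ := h
        have : pvIt m ps t i ∈ (List.range t).map (fun a => pvIt m ps a i) :=
          List.mem_map.mpr ⟨a, List.mem_range.mpr ha, hae⟩
        rw [(PySem.Set.contains_iff _ _).mpr this] at h5
        cases h5
    · have htL : t < L := by omega
      have hg := hmin t htL
      rw [pvStopP] at hg
      push Not at hg
      obtain ⟨hm, hrange, hmemo, hdist⟩ := hg
      have hnotmem : pvIt m ps t i ∉ (List.range t).map (fun a => pvIt m ps a i) := by
        intro hmem
        obtain ⟨a, ha, hae⟩ := List.mem_map.mp hmem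
        exact hdist a (List.mem_range.mp ha) hae
      have hcontains : memo.contains (pvIt m ps t i) = false := by
        cases hb : memo.contains (pvIt m ps t i)
        · rfl
        · exact absurd hb hmemo
      have hseen : PySem.Set.contains ((List.range t).map (fun a => pvIt m ps a i))
          (pvIt m ps t i) = false := by
        cases hb : PySem.Set.contains ((List.range t).map (fun a => pvIt m ps a i)) (pvIt m ps t i)
        · rfl
        · exact absurd ((PySem.Set.contains_iff _ _).mp hb) hnotmem
      rw [if_pos ⟨hm, hrange.1, hrange.2, hcontains, hseen⟩]
      have hnext : pvIx ps (pvIt m ps t i) = pvIt m ps (t + 1) i := by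
        rw [pvIt_succ', pvStepUp, if_pos ⟨hm, hrange.1, hrange.2⟩]
      have hadd : PySem.Set.add ((List.range t).map (fun a => pvIt m ps a i)) (pvIt m ps t i)
          = (List.range (t + 1)).map (fun a => pvIt m ps a i) := by
        rw [pvSet_add_fresh _ _ hnotmem, List.range_succ, List.map_append, List.map_cons,
          List.map_nil]
      have happ : ((List.range t).map (fun a => pvIt m ps a i)) ++ [pvIt m ps t i]
          = (List.range (t + 1)).map (fun a => pvIt m ps a i) := by
        rw [List.range_succ, List.map_append, List.map_cons, List.map_nil]
      rw [hadd, happ, hnext]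
      exact ih (t + 1) (by omega) (by omega)


-- ---------- reachability is invariant along the chain ----------

theorem pvReach_it_iff (m : Int) (ps : List Int) (u : Nat) (y : Int) :
    pvReach m ps (pvIt m ps u y) ↔ pvReach m ps y := by
  constructor
  · rintro ⟨k, hk⟩
    exact ⟨k + u, by rw [pvIt_add]; exact hk⟩
  · rintro ⟨k, hk⟩
    by_cases hku : k ≤ u
    · have : pvIt m ps u y = m := by
        rw [show u = (u - k) + k by omega, pvIt_add, hk, pvIt_m]
      exact ⟨0, by rw [pvIt_zero, this]⟩
    · exact ⟨k - u, by rw [← pvIt_add, show k - u + u = k by omega]; exact hk⟩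

theorem pvReach_step_iff (m : Int) (ps : List Int) (y : Int) :
    pvReach m ps (pvStepUp m ps y) ↔ pvReach m ps y := by
  have h := pvReach_it_iff m ps 1 y
  rwa [show pvIt m ps 1 y = pvStepUp m ps y from by simp [pvIt]] at h

theorem pvNotHit_of_not_reach (m : Int) (ps : List Int) (j : Int) (h : ¬ pvReach m ps j) :
    pvHit m ps ps.length j = false := by
  cases hb : pvHit m ps ps.length j
  · rfl
  · exact absurd ((pvReach_iff_hit m ps j).mpr hb) h

-- ---------- the resolved accumulator at the stop node ----------

theorem pvAcc0 (m : Int) (ps ds : List Int) (memo : PySem.Dict Int (Option Int))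
    (hsound : pvSound m ps ds memo) (i : Int) (L : Nat)
    (hPL : pvStopP m ps memo i L) (hmin : ∀ t < L, ¬ pvStopP m ps memo i t) :
    pvResolve m ds memo (pvIt m ps L i)
      = if pvHit m ps ps.length (pvIt m ps L i)
          then some (pvSum m ps ds (pvIt m ps L i)) else none := by
  by_cases hy : pvIt m ps L i = m
  · rw [pvResolve, if_pos hy, hy]
    rw [if_pos ((pvHit_iff m ps ps.length m).mpr ⟨0, Nat.zero_le _, pvIt_zero m ps m⟩)]
    rw [pvSum_m]
  · rw [pvResolve, if_neg hy]
    cases hg : memo.get? (pvIt m ps L i) with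
    | some v =>
      obtain ⟨_, _, _, hv⟩ := hsound _ v hg
      rw [Option.getD_some]
      exact hv
    | none =>
      rw [Option.getD_none]
      have hnr : ¬ pvReach m ps (pvIt m ps L i) := by
        rcases hPL with h | h | h | h
        · exact absurd h hy
        · intro hr
          rcases pvReach_cases m ps _ hr with h' | h'
          · exact hy h'
          · exact h h'
        · rw [PySem.Dict.get?_eq_none_iff_contains] at hg
          rw [hg] at h
          cases h
        · obtain ⟨a, haL, hae⟩ := h
          have hcyc : pvIt m ps (L - a) (pvIt m ps a i) = pvIt m ps a i := by
            rw [← pvIt_add, show L - a + a = L by omega, ← hae]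
          have hneq : pvIt m ps a i ≠ m := by
            have hg' := hmin a haL
            rw [pvStopP] at hg'
            push Not at hg'
            exact hg'.1
          rw [← hae]
          intro hr
          exact hneq (pvReach_cycle_eq_m m ps _ (L - a) hr hcyc (by omega))
      rw [if_neg (by rw [pvNotHit_of_not_reach m ps _ hnr]; exact Bool.false_ne_true)]

-- ---------- the reversed memoization fold ----------

theorem pvRevFold (m : Int) (ps ds : List Int) (i : Int) :
    ∀ (t : Nat) (memo : PySem.Dict Int (Option Int)), pvSound m ps ds memo →
      (∀ a < t, pvIt m ps a i ≠ m ∧ 0 ≤ pvIt m ps a i ∧ pvIt m ps a i < (ps.length : Int)) →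
      (((List.range t).map (fun a => pvIt m ps a i)).reverse.foldl
          (fun (p : PySem.Dict Int (Option Int) × Option Int) k =>
            (p.1.insert k (p.2.map (fun v => v + pvIx ds k)), p.2.map (fun v => v + pvIx ds k)))
          (memo, if pvHit m ps ps.length (pvIt m ps t i)
                   then some (pvSum m ps ds (pvIt m ps t i)) else none)).2
        = (if pvHit m ps ps.length i then some (pvSum m ps ds i) else none)
      ∧ pvSound m ps ds
        (((List.range t).map (fun a => pvIt m ps a i)).reverse.foldl
          (fun (p : PySem.Dict Int (Option Int) × Option Int) k =>
            (p.1.insert k (p.2.map (fun v => v + pvIx ds k)), p.2.map (fun v => v + pvIx ds k)))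
          (memo, if pvHit m ps ps.length (pvIt m ps t i)
                   then some (pvSum m ps ds (pvIt m ps t i)) else none)).1 := by
  intro t
  induction t with
  | zero =>
    intro memo hsound _
    constructor
    · simp [pvIt_zero]
    · simp only [List.range_zero, List.map_nil, List.reverse_nil, List.foldl_nil]
      exact hsound
  | succ t ih =>
    intro memo hsound hfacts
    obtain ⟨hm, h0, hlt⟩ := hfacts t (by omega)
    have hstep : pvStepUp m ps (pvIt m ps t i) = pvIt m ps (t + 1) i := (pvIt_succ' m ps t i).symm
    have hrw : ((List.range (t + 1)).map (fun a => pvIt m ps a i)).reverse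
        = pvIt m ps t i :: ((List.range t).map (fun a => pvIt m ps a i)).reverse := by
      rw [List.range_succ, List.map_append, List.map_cons, List.map_nil, List.reverse_append]
      rfl
    rw [hrw, List.foldl_cons]
    have hacc : (if pvHit m ps ps.length (pvIt m ps (t + 1) i)
          then some (pvSum m ps ds (pvIt m ps (t + 1) i)) else none).map
            (fun v => v + pvIx ds (pvIt m ps t i))
        = (if pvHit m ps ps.length (pvIt m ps t i)
            then some (pvSum m ps ds (pvIt m ps t i)) else none) := by
      by_cases hb : pvHit m ps ps.length (pvIt m ps (t + 1) i) = true
      · have hr1 : pvReach m ps (pvIt m ps (t + 1) i) := (pvReach_iff_hit m ps _).mpr hb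
        have hr0 : pvReach m ps (pvIt m ps t i) := by
          rw [← pvReach_step_iff, hstep]; exact hr1
        rw [if_pos hb, if_pos ((pvReach_iff_hit m ps _).mp hr0), Option.map_some,
          pvSum_step m ps ds _ hr0 hm, hstep, Int.add_comm]
      · have hr1 : ¬ pvReach m ps (pvIt m ps (t + 1) i) := fun hr =>
          hb ((pvReach_iff_hit m ps _).mp hr)
        have hr0 : ¬ pvReach m ps (pvIt m ps t i) := fun hr =>
          hr1 (by rw [← hstep, pvReach_step_iff]; exact hr)
        rw [Bool.not_eq_true] at hb
        rw [if_neg (by rw [hb]; exact Bool.false_ne_true),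
          if_neg (by rw [pvNotHit_of_not_reach m ps _ hr0]; exact Bool.false_ne_true)]
        rfl
    rw [hacc]
    have hsound' : pvSound m ps ds (memo.insert (pvIt m ps t i)
        (if pvHit m ps ps.length (pvIt m ps t i)
          then some (pvSum m ps ds (pvIt m ps t i)) else none)) := by
      intro j v hj
      rw [PySem.Dict.get?_insert] at hj
      by_cases hje : j = pvIt m ps t i
      · rw [if_pos hje] at hj
        obtain rfl : (if pvHit m ps ps.length (pvIt m ps t i)
            then some (pvSum m ps ds (pvIt m ps t i)) else none) = v := by
          injection hj
        rw [hje]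
        exact ⟨hm, h0, hlt, rfl⟩
      · rw [if_neg hje] at hj
        exact hsound j v hj
    exact ih _ hsound' (fun a ha => hfacts a (by omega))

-- ---------- one iteration of B's outer loop ----------

theorem pvStepB_eval (m : Int) (ps ds : List Int) (memo : PySem.Dict Int (Option Int))
    (best i : Int) (hsound : pvSound m ps ds memo) :
    pvSound m ps ds (pvStepB m ps ds (memo, best) i).1 ∧
      (pvStepB m ps ds (memo, best) i).2
        = if pvHit m ps ps.length i then max best (pvSum m ps ds i) else best := by
  obtain ⟨Lw, hLle, hLP⟩ := pvStop_exists m ps memo i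
  have inst : DecidablePred (fun t => pvStopP m ps memo i t) := Classical.decPred _
  have hex : ∃ t, pvStopP m ps memo i t := ⟨Lw, hLP⟩
  have hPL : pvStopP m ps memo i (@Nat.find _ inst hex) := @Nat.find_spec _ inst hex
  have hmin : ∀ t < @Nat.find _ inst hex, ¬ pvStopP m ps memo i t :=
    fun t ht => @Nat.find_min _ inst hex t ht
  have hLn : @Nat.find _ inst hex ≤ ps.length :=
    le_trans (@Nat.find_min' _ inst hex Lw hLP) hLle
  have hw := pvWalk_go m ps memo i (@Nat.find _ inst hex) hPL hmin (ps.length + 1) 0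
    (by omega) (by omega)
  simp only [List.range_zero, List.map_nil, pvIt_zero] at hw
  have hwalk : pvWalk m ps memo (ps.length + 1) PySem.Set.empty [] i
      = ((List.range (@Nat.find _ inst hex)).map (fun a => pvIt m ps a i),
          pvIt m ps (@Nat.find _ inst hex) i) := hw
  have hfacts : ∀ a < @Nat.find _ inst hex,
      pvIt m ps a i ≠ m ∧ 0 ≤ pvIt m ps a i ∧ pvIt m ps a i < (ps.length : Int) := by
    intro a ha
    have hg := hmin a ha
    rw [pvStopP] at hg
    push Not at hg
    exact ⟨hg.1, hg.2.1⟩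
  have hres := pvAcc0 m ps ds memo hsound i (@Nat.find _ inst hex) hPL hmin
  have hfold := pvRevFold m ps ds i (@Nat.find _ inst hex) memo hsound hfacts
  rw [pvStepB, hwalk]
  simp only
  rw [hres]
  refine ⟨hfold.2, ?_⟩
  rw [hfold.1]
  by_cases hb : pvHit m ps ps.length i = true
  · rw [if_pos hb, if_pos hb]
    show (if pvSum m ps ds i > best then pvSum m ps ds i else best) = max best (pvSum m ps ds i)
    by_cases hgt : pvSum m ps ds i > best
    · rw [if_pos hgt, max_eq_right (le_of_lt hgt)]
    · rw [if_neg hgt, max_eq_left (by omega)]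
  · rw [if_neg hb, if_neg hb]

-- ---------- B's outer loop ----------

theorem pvSound_empty (m : Int) (ps ds : List Int) : pvSound m ps ds PySem.Dict.empty := by
  intro j v hj
  rw [PySem.Dict.get?_empty] at hj
  cases hj

theorem pvB_outer (m : Int) (ps ds : List Int) (d0 : Int) :
    ∀ t : Nat, t ≤ ps.length →
      pvSound m ps ds
        (((PySem.List.pyRange 0 (t : Int) 1).foldl (pvStepB m ps ds) (PySem.Dict.empty, d0)).1) ∧
      ((PySem.List.pyRange 0 (t : Int) 1).foldl (pvStepB m ps ds) (PySem.Dict.empty, d0)).2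
        = pvFMax d0 (((List.range t).filter (fun (a : Nat) => pvHit m ps ps.length (a : Int))).map
            (fun (a : Nat) => pvSum m ps ds (a : Int))) := by
  intro t
  induction t with
  | zero =>
    intro _
    rw [show ((0 : Nat) : Int) = 0 from rfl, PySem.List.pyRange_one_eq_nil (le_refl 0)]
    exact ⟨pvSound_empty m ps ds, rfl⟩
  | succ t ih =>
    intro ht
    obtain ⟨hsound, hval⟩ := ih (by omega)
    have hsplit : PySem.List.pyRange 0 ((t + 1 : Nat) : Int) 1
        = PySem.List.pyRange 0 (t : Int) 1 ++ [(t : Int)] := by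
      rw [show ((t + 1 : Nat) : Int) = (t : Int) + 1 by push_cast; ring]
      exact PySem.List.pyRange_one_succ_right (by exact_mod_cast Nat.zero_le t)
    rw [hsplit, List.foldl_append, List.foldl_cons, List.foldl_nil]
    set st := (PySem.List.pyRange 0 (t : Int) 1).foldl (pvStepB m ps ds)
      (PySem.Dict.empty, d0) with hst
    have hstep := pvStepB_eval m ps ds st.1 st.2 (t : Int) hsound
    rw [Prod.mk.eta] at hstep
    refine ⟨hstep.1, ?_⟩
    rw [hstep.2, hval]
    rw [List.range_succ, List.filter_append, List.map_append]
    by_cases hb : pvHit m ps ps.length (t : Int) = true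
    · rw [show List.filter (fun (a : Nat) => pvHit m ps ps.length (a : Int)) [t] = [t] by
        simp [List.filter, hb]]
      rw [List.map_cons, List.map_nil, pvFMax_append, hb, if_pos rfl]
      rfl
    · rw [Bool.not_eq_true] at hb
      rw [show List.filter (fun (a : Nat) => pvHit m ps ps.length (a : Int)) [t] = [] by
        simp [List.filter, hb]]
      rw [List.map_nil, List.append_nil, hb]
      simp only [Bool.false_eq_true, if_false]

theorem pvB_eval (m : Int) (ps ds : List Int) (hpre : Pre_total_time m ps ds) :
    total_time_alt m ps ds
      = max 0 (pvFMax (pvIx ds m)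
          (((List.range ps.length).filter (fun (a : Nat) => pvHit m ps ps.length (a : Int))).map
            (fun (a : Nat) => pvSum m ps ds (a : Int)))) := by
  obtain ⟨hkey, hin, hnc, _⟩ := hpre
  obtain ⟨v, hv⟩ : ∃ v, PySem.List.pyGet? ds m = some v := by
    cases h : PySem.List.pyGet? ds m with
    | none => rw [PySem.List.pyGet?_eq_none_iff] at h; exact absurd hin h
    | some v => exact ⟨v, rfl⟩
  have hvix : v = pvIx ds m := by
    rw [show pvIx ds m = (PySem.List.pyGet? ds m).getD 0 from by
      simp [pvIx, PySem.List.pyGetD, PySem.List.pyGet?], hv, Option.getD_some]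
  rw [total_time_alt, hv]
  simp only [PySem.List.len_eq]
  have houter := (pvB_outer m ps ds v ps.length (le_refl _)).2
  rw [houter, hvix]
  by_cases hb : pvFMax (pvIx ds m)
      (((List.range ps.length).filter (fun (a : Nat) => pvHit m ps ps.length (a : Int))).map
        (fun (a : Nat) => pvSum m ps ds (a : Int))) > 0
  · rw [if_pos hb, max_eq_right (le_of_lt hb)]
  · rw [if_neg hb, max_eq_left (by omega)]

-- ---------- the two maxima agree ----------

theorem pvBridge (m : Int) (ps ds : List Int)
    (hnc : (0 ≤ m ∧ m < (ps.length : Int)) → pvHit m ps ps.length (pvIx ps m) = false) :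
    pvMax m ps ds m
      = pvFMax (pvIx ds m)
          (((List.range ps.length).filter (fun (a : Nat) => pvHit m ps ps.length (a : Int))).map
            (fun (a : Nat) => pvSum m ps ds (a : Int))) := by
  have hrm := pvReach_m m ps
  refine le_antisymm ?_ ?_
  · rw [pvMax]
    refine pvFMax_le _ _ _ ?_ ?_
    · rw [pvSum_m]
      exact pvFMax_base _ _
    · intro y hy
      obtain ⟨j, hj, rfl⟩ := List.mem_map.mp hy
      obtain ⟨t, _, hit⟩ := (pvSub_mem m ps hnc _ m j hrm).mp hj
      have hrj : pvReach m ps j := ⟨t, hit⟩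
      rcases pvReach_cases m ps j hrj with h | h
      · rw [h, pvSum_m]
        exact pvFMax_base _ _
      · have hja : j = ((j.toNat : Nat) : Int) := by omega
        have hlt : j.toNat < ps.length := by omega
        refine pvFMax_mem _ _ _ (List.mem_map.mpr ⟨j.toNat, ?_, by rw [← hja]⟩)
        refine List.mem_filter.mpr ⟨List.mem_range.mpr hlt, ?_⟩
        rw [← hja]
        exact (pvReach_iff_hit m ps j).mp hrj
  · refine pvFMax_le _ _ _ ?_ ?_
    · rw [pvMax, ← pvSum_m m ps ds]
      exact pvFMax_base _ _
    · intro y hy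
      obtain ⟨a, ha, rfl⟩ := List.mem_map.mp hy
      obtain ⟨_, hhit⟩ := List.mem_filter.mp ha
      have hra : pvReach m ps (a : Int) := (pvReach_iff_hit m ps _).mpr hhit
      obtain ⟨k, hk, hit⟩ := pvReach_bound m ps _ hra
      rw [pvMax]
      refine pvFMax_mem _ _ _ (List.mem_map.mpr ⟨(a : Int), ?_, rfl⟩)
      exact (pvSub_mem m ps hnc _ m _ hrm).mpr ⟨k, by omega, hit⟩

-- ===== VERDICT (by name: the statement is the Claim_ definition above) =====
theorem total_time_spec : Claim_equal_total_time := by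
  intro m ps ds _ hpre
  unfold Spec_total_time
  rw [pvA_eval m ps ds hpre, pvB_eval m ps ds hpre, pvBridge m ps ds hpre.2.2.1]
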